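-- pv_equiv track=rewrite | github.com/Peetskeuze/culinary-decision-runner | apps/peet_kiest_vooruit/vooruit_context.py | compute_kitchen_plan
-- ===== SOURCE A (Python) =====
-- from typing import Any, Dict, List
--
-- ACCENT_POOL: List[str] = ["Italiaans", "Mediterraans", "Aziatisch"]
--
-- def compute_kitchen_plan(days: int, rotation_index: int) -> Dict[int, str]:
--     """
--     Jouw keukenlogica:
--     - 2 dagen: beide NL/BE
--     - 3 dagen: dag 1 en 3 NL/BE, dag 2 accent
--     - 4 dagen: dag 1 en 3 NL/BE, dag 2 en 4 accent
--     - 5 dagen: dag 1, 3 en 5 NL/BE, dag 2 en 4 accent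
--     - FR vermijden (zit niet in accent pool)
--     - Rotatie voorkomt dat dag 2 altijd Italiaans is als iemand dit wekelijks herhaalt
--     """
--     if days == 2:
--         nlbe_days = {1, 2}
--     elif days in (3, 4):
--         nlbe_days = {1, 3}
--     else:  # 5
--         nlbe_days = {1, 3, 5}
--
--     accent_days = [d for d in range(1, days + 1) if d not in nlbe_days]
--
--     plan: Dict[int, str] = {}
--     for day in range(1, days + 1):
--         if day in nlbe_days:
--             plan[day] = "NL/BE"
--         else:
--             # accent per accent_day in volgorde, zonder dubbele binnen 1 run
--             idx = accent_days.index(day)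
--             plan[day] = ACCENT_POOL[(rotation_index + idx) % len(ACCENT_POOL)]
--     return plan
-- ===== SOURCE B (Python) =====
-- from typing import Dict, List
--
-- ACCENT_POOL: List[str] = ["Italiaans", "Mediterraans", "Aziatisch"]
--
-- def compute_kitchen_plan(days: int, rotation_index: int) -> Dict[int, str]:
--     # Decide the NL/BE day pattern (same irregular case analysis as the spec).
--     if days == 2:
--         nlbe = [1, 2]
--     elif days in (3, 4):
--         nlbe = [1, 3]
--     else:
--         nlbe = [1, 3, 5]
--
--     # Stage 1: build the two labelled streams independently.
--     nlbe_entries = [(d, "NL/BE") for d in range(1, days + 1) if d in nlbe]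
--     accent_entries = [(d, ACCENT_POOL[(rotation_index + i) % len(ACCENT_POOL)])
--                      for i, d in enumerate(d for d in range(1, days + 1) if d not in nlbe)]
--
--     # Stage 2: two-pointer merge of the two day-sorted streams into the plan.
--     plan: Dict[int, str] = {}
--     i = j = 0
--     while i < len(nlbe_entries) or j < len(accent_entries):
--         if j >= len(accent_entries) or (i < len(nlbe_entries)
--                                         and nlbe_entries[i][0] < accent_entries[j][0]):
--             day, label = nlbe_entries[i]
--             i += 1
--         else:
--             day, label = accent_entries[j]
--             j += 1
--         plan[day] = label
--     return plan
-- ===== Notes on version B (the rewrite author's own statement) =====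
-- stated objective: alternative
-- what changed: B builds the NL/BE entries and the enumerate-labelled accent entries as two separate day-sorted streams and merges them two-pointer style into the plan, instead of A's single dict-building pass that rescans accent_days with .index for every accent day.
import Mathlib
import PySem

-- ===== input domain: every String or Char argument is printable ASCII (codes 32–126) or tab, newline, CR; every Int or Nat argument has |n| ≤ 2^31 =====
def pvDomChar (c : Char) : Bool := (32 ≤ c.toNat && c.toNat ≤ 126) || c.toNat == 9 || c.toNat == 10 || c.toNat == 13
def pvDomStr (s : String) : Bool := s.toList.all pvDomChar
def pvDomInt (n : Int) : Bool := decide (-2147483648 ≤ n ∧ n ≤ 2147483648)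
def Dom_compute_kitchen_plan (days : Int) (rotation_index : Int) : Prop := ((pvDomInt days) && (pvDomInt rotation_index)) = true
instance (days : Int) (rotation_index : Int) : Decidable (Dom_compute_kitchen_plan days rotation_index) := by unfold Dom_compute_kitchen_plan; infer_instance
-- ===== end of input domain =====

-- B replaces A's single dict-building pass with per-day accent_days.index scans by a staged construction: two labelled streams (NL/BE days, enumerate-labelled accent days) merged two-pointer style into the plan.


-- ===== PORT A =====
def pvPool : List String := ["Italiaans", "Mediterraans", "Aziatisch"]

-- A's nlbe_days set (literal case analysis from the Python)
def pvNlbe (days : Int) : PySem.Set Int :=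
  if days = 2 then PySem.Set.ofList [1, 2]
  else if days = 3 ∨ days = 4 then PySem.Set.ofList [1, 3]
  else PySem.Set.ofList [1, 3, 5]

def compute_kitchen_plan (days : Int) (rotation_index : Int) : List (Int × String) :=
  let nlbe := pvNlbe days
  let accent_days := (PySem.List.pyRange 1 (days + 1) 1).filter
      (fun d => !(PySem.Set.contains nlbe d))
  ((PySem.List.pyRange 1 (days + 1) 1).foldl (fun plan day =>
      if PySem.Set.contains nlbe day then plan.insert day "NL/BE"
      else plan.insert day ((PySem.List.pyGet? pvPool
        (PySem.Int.mod (rotation_index + (((PySem.List.index? accent_days day).getD 0 : Nat) : Int))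
          (PySem.List.len pvPool))).getD ""))
    PySem.Dict.empty).items

-- ===== PORT B =====
-- B's nlbe pattern (a plain list in Source B)
def pvNlbeList (days : Int) : List Int :=
  if days = 2 then [1, 2]
  else if days = 3 ∨ days = 4 then [1, 3]
  else [1, 3, 5]

-- Source B's while loop: two-pointer merge of the two streams into the plan dict
def pvMergeInto (xs ys : List (Int × String)) (plan : PySem.Dict Int String) : PySem.Dict Int String :=
  match xs, ys with
  | [], [] => plan
  | x :: xs', [] => pvMergeInto xs' [] (plan.insert x.1 x.2)
  | [], y :: ys' => pvMergeInto [] ys' (plan.insert y.1 y.2)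
  | x :: xs', y :: ys' =>
      if x.1 < y.1 then pvMergeInto xs' (y :: ys') (plan.insert x.1 x.2)
      else pvMergeInto (x :: xs') ys' (plan.insert y.1 y.2)
termination_by xs.length + ys.length

def compute_kitchen_plan_alt (days : Int) (rotation_index : Int) : List (Int × String) :=
  let nlbe := pvNlbeList days
  let nlbe_entries := ((PySem.List.pyRange 1 (days + 1) 1).filter
      (fun d => nlbe.contains d)).map (fun d => (d, "NL/BE"))
  let accent_entries := (PySem.List.enumerate ((PySem.List.pyRange 1 (days + 1) 1).filter
      (fun d => !(nlbe.contains d))) 0).map (fun e =>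
        (e.2, (PySem.List.pyGet? pvPool
          (PySem.Int.mod (rotation_index + e.1) (PySem.List.len pvPool))).getD ""))
  (pvMergeInto nlbe_entries accent_entries PySem.Dict.empty).items

-- ===== PRECONDITION & SPEC =====
def Spec_compute_kitchen_plan (days : Int) (rotation_index : Int) (out : List (Int × String)) : Prop := out = compute_kitchen_plan_alt days rotation_index
instance (days : Int) (rotation_index : Int) (out : List (Int × String)) : Decidable (Spec_compute_kitchen_plan days rotation_index out) := by unfold Spec_compute_kitchen_plan; infer_instance

-- ===== CLAIM (what is proved, stated in full; the proofs are below) =====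
def Claim_equal_compute_kitchen_plan : Prop := ∀ (days : Int) (rotation_index : Int), Dom_compute_kitchen_plan days rotation_index → Spec_compute_kitchen_plan days rotation_index (compute_kitchen_plan days rotation_index)

-- ===== LEMMAS AND PROOFS =====

-- the pure merge of the two streams (proof helper naming what pvMergeInto inserts, in order)
def pvMerge : List (Int × String) → List (Int × String) → List (Int × String)
  | [], ys => ys
  | x :: xs, [] => x :: pvMerge xs []
  | x :: xs, y :: ys =>
      if x.1 < y.1 then x :: pvMerge xs (y :: ys) else y :: pvMerge (x :: xs) ys
termination_by xs ys => xs.length + ys.length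

theorem pvMergeInto_eq_foldl : ∀ (xs ys : List (Int × String)) (plan : PySem.Dict Int String),
    pvMergeInto xs ys plan = (pvMerge xs ys).foldl (fun pl e => pl.insert e.1 e.2) plan := by
  intro xs ys
  induction xs, ys using pvMerge.induct with
  | case1 ys =>
    intro plan
    cases ys with
    | nil => simp [pvMergeInto, pvMerge]
    | cons y ys =>
      induction ys generalizing y plan with
      | nil => simp [pvMergeInto, pvMerge]
      | cons z zs ih => simp [pvMergeInto, pvMerge, ih]
  | case2 x xs ih => intro plan; simp [pvMergeInto, pvMerge, ih]
  | case3 x xs y ys hlt ih => intro plan; simp [pvMergeInto, pvMerge, hlt, ih]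
  | case4 x xs y ys hlt ih => intro plan; simp [pvMergeInto, pvMerge, hlt, ih]

-- merging the partition of a strictly increasing list F restores F's order, with B's
-- enumerate label at each accent day equal to A's index?-based label.
theorem pv_merge_partition (p : Int → Bool) (lab : Int → String)
    (F : List Int) (hF : F.Pairwise (· < ·)) :
    ∀ (L pre : List Int), pre ++ L = F →
    pvMerge ((L.filter p).map (fun d => (d, "NL/BE")))
            ((PySem.List.enumerate (L.filter (fun d => !p d))
                ((pre.filter (fun d => !p d)).length : Int)).map (fun e => (e.2, lab e.1)))
    = L.map (fun d => if p d then (d, "NL/BE")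
        else (d, lab (((PySem.List.index? (F.filter (fun d => !p d)) d).getD 0 : Nat) : Int))) := by
  intro L
  induction L with
  | nil => intro pre h; simp [pvMerge]
  | cons d rest ih =>
    intro pre hpre
    have hnd : F.Nodup := hF.imp (fun h => ne_of_lt h)
    have hdrest : ∀ x ∈ rest, d < x := by
      have hpw : (pre ++ d :: rest).Pairwise (· < ·) := hpre ▸ hF
      have := (List.pairwise_append.mp hpw).2.1
      exact fun x hx => (List.pairwise_cons.mp this).1 x hx
    by_cases hp : p d = true
    · have hfp : (d :: rest).filter p = d :: rest.filter p := by simp [hp]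
      have hfq : (d :: rest).filter (fun d => !p d) = rest.filter (fun d => !p d) := by
        simp [hp]
      rw [hfp, hfq]
      simp only [List.map_cons]
      have hstep : pvMerge ((d, "NL/BE") :: (rest.filter p).map (fun d => (d, "NL/BE")))
            ((PySem.List.enumerate (rest.filter (fun d => !p d))
                ((pre.filter (fun d => !p d)).length : Int)).map (fun e => (e.2, lab e.1)))
          = (d, "NL/BE") :: pvMerge ((rest.filter p).map (fun d => (d, "NL/BE")))
            ((PySem.List.enumerate (rest.filter (fun d => !p d))
                ((pre.filter (fun d => !p d)).length : Int)).map (fun e => (e.2, lab e.1))) := by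
        cases hys : (PySem.List.enumerate (rest.filter (fun d => !p d))
            ((pre.filter (fun d => !p d)).length : Int)).map (fun e => (e.2, lab e.1)) with
        | nil => simp [pvMerge]
        | cons y ys =>
          have hy : y.1 ∈ rest := by
            have hmemy : y ∈ (PySem.List.enumerate (rest.filter (fun d => !p d))
                ((pre.filter (fun d => !p d)).length : Int)).map (fun e => (e.2, lab e.1)) := by
              rw [hys]; exact List.mem_cons_self
            obtain ⟨e, he, hey⟩ := List.mem_map.mp hmemy
            have hmem : (fun (x : Int × Int) => x.2) e ∈ (PySem.List.enumerate
                (rest.filter (fun d => !p d))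
                ((pre.filter (fun d => !p d)).length : Int)).map (fun x => x.2) :=
              List.mem_map_of_mem he
            rw [PySem.List.map_snd_enumerate] at hmem
            have : e.2 ∈ rest := List.mem_of_mem_filter hmem
            rw [← hey]; exact this
          have : d < y.1 := hdrest _ hy
          simp [pvMerge, this]
      rw [hstep]
      have hpre2 : (pre ++ [d]).filter (fun d => !p d) = pre.filter (fun d => !p d) := by
        simp [List.filter_append, hp]
      have hih := ih (pre ++ [d]) (by simpa using hpre)
      rw [hpre2] at hih
      rw [hih, if_pos hp]
    · have hp2 : p d = false := eq_false_of_ne_true hp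
      have hfp : (d :: rest).filter p = rest.filter p := by simp [hp2]
      have hfq : (d :: rest).filter (fun d => !p d) = d :: rest.filter (fun d => !p d) := by
        simp [hp2]
      rw [hfp, hfq]
      simp only [PySem.List.enumerate_cons, List.map_cons]
      have hstep : pvMerge ((rest.filter p).map (fun d => (d, "NL/BE")))
            ((d, lab ((pre.filter (fun d => !p d)).length : Int)) ::
              (PySem.List.enumerate (rest.filter (fun d => !p d))
                (((pre.filter (fun d => !p d)).length : Int) + 1)).map (fun e => (e.2, lab e.1)))
          = (d, lab ((pre.filter (fun d => !p d)).length : Int)) ::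
            pvMerge ((rest.filter p).map (fun d => (d, "NL/BE")))
              ((PySem.List.enumerate (rest.filter (fun d => !p d))
                (((pre.filter (fun d => !p d)).length : Int) + 1)).map (fun e => (e.2, lab e.1))) := by
        cases hxs : (rest.filter p).map (fun d => (d, "NL/BE")) with
        | nil => simp [pvMerge]
        | cons x xs =>
          have hx : x.1 ∈ rest := by
            have hmemx : x ∈ (rest.filter p).map (fun d => (d, "NL/BE")) := by
              rw [hxs]; exact List.mem_cons_self
            obtain ⟨e, he, hex⟩ := List.mem_map.mp hmemx
            rw [← hex]; exact List.mem_of_mem_filter he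
          have hdx : ¬ (x.1 < d) := not_lt.mpr (le_of_lt (hdrest _ hx))
          simp [pvMerge, hdx]
      rw [hstep]
      have hdparts : F.filter (fun d => !p d)
          = pre.filter (fun d => !p d) ++ d :: rest.filter (fun d => !p d) := by
        rw [← hpre, List.filter_append, hfq]
      have hdpre : d ∉ pre.filter (fun d => !p d) := by
        intro hmem
        have hndp : (pre ++ d :: rest).Nodup := hpre ▸ hnd
        exact List.disjoint_of_nodup_append hndp (List.mem_of_mem_filter hmem) List.mem_cons_self
      have hidx : PySem.List.index? (F.filter (fun d => !p d)) d
          = some (pre.filter (fun d => !p d)).length := by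
        rw [hdparts]
        exact (PySem.List.index?_eq_some_iff _ _ _).mpr ⟨_, _, rfl, rfl, hdpre⟩
      have hcast : (((pre ++ [d]).filter (fun d => !p d)).length : Int)
          = ((pre.filter (fun d => !p d)).length : Int) + 1 := by
        have : (pre ++ [d]).filter (fun d => !p d) = pre.filter (fun d => !p d) ++ [d] := by
          simp [List.filter_append, hp2]
        rw [this]; simp
      have hih := ih (pre ++ [d]) (by simpa using hpre)
      rw [hcast] at hih
      rw [hih, if_neg hp, hidx]
      simp

-- the two case analyses name the same membership test
theorem pvNlbe_contains_eq (days d : Int) :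
    PySem.Set.contains (pvNlbe days) d = (pvNlbeList days).contains d := by
  unfold pvNlbe pvNlbeList
  split_ifs <;> rfl

-- ===== VERDICT (by name: the statement is the Claim_ definition above) =====
theorem compute_kitchen_plan_spec : Claim_equal_compute_kitchen_plan := by
  intro days rotation_index _
  unfold Spec_compute_kitchen_plan compute_kitchen_plan compute_kitchen_plan_alt
  set p : Int → Bool := fun d => (pvNlbeList days).contains d with hpdef
  set F := PySem.List.pyRange 1 (days + 1) 1 with hFdef
  have hFpw : F.Pairwise (· < ·) := PySem.List.pairwise_lt_pyRange_one 1 (days + 1)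
  have hFnd : F.Nodup := hFpw.imp (fun h => ne_of_lt h)
  set lab : Int → String := fun i =>
    (PySem.List.pyGet? pvPool (PySem.Int.mod (rotation_index + i) (PySem.List.len pvPool))).getD ""
    with hlabdef
  -- value assigned by A at each day
  set f : Int → String := fun d => if p d then "NL/BE"
      else lab (((PySem.List.index? (F.filter (fun d => !p d)) d).getD 0 : Nat) : Int) with hfdef
  -- A: a fold over fresh distinct keys appends plainly
  have hA : (F.foldl (fun plan day =>
        if PySem.Set.contains (pvNlbe days) day then plan.insert day "NL/BE"
        else plan.insert day (lab (((PySem.List.index?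
          (F.filter (fun d => !(PySem.Set.contains (pvNlbe days) d))) day).getD 0 : Nat) : Int)))
      PySem.Dict.empty).items = F.map (fun d => (d, f d)) := by
    have hbody : ∀ (plan : PySem.Dict Int String) (day : Int), day ∈ F →
        (if PySem.Set.contains (pvNlbe days) day then plan.insert day "NL/BE"
         else plan.insert day (lab (((PySem.List.index?
           (F.filter (fun d => !(PySem.Set.contains (pvNlbe days) d))) day).getD 0 : Nat) : Int)))
        = plan.insert day (f day) := by
      intro plan day _
      simp only [pvNlbe_contains_eq, hfdef, ← hpdef]
      split <;> rfl
    rw [PySem.List.foldl_congr_mem F _ (fun plan day => plan.insert day (f day))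
          PySem.Dict.empty hbody,
        PySem.Dict.items_foldl_insert_fresh F (fun a => a) f PySem.Dict.empty
          (by intro a _; exact PySem.Dict.contains_empty a) (by simpa using hFnd)]
    simp [show (PySem.Dict.empty : PySem.Dict Int String).items = [] from rfl]
  -- B: the merge restores F's order with the same values
  have hmerge := pv_merge_partition p lab F hFpw F [] (by simp)
  have hB : (pvMergeInto
        ((F.filter p).map (fun d => (d, "NL/BE")))
        ((PySem.List.enumerate (F.filter (fun d => !p d)) 0).map
          (fun e => (e.2, lab e.1)))
        PySem.Dict.empty).items = F.map (fun d => (d, f d)) := by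
    rw [pvMergeInto_eq_foldl]
    rw [show ((0 : Int) = ((([] : List Int).filter (fun d => !p d)).length : Int)) by simp] at *
    rw [hmerge]
    have hkeys : (F.map (fun d => if p d then (d, "NL/BE")
        else (d, lab (((PySem.List.index? (F.filter (fun d => !p d)) d).getD 0 : Nat) : Int)))).map
          (fun e => e.1) = F := by
      rw [List.map_map]
      have : ∀ d ∈ F, ((fun e => e.1) ∘ (fun d => if p d then (d, "NL/BE")
          else (d, lab (((PySem.List.index? (F.filter (fun d => !p d)) d).getD 0 : Nat) : Int)))) d
          = id d := by intro d _; simp only [Function.comp]; split <;> rfl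
      rw [List.map_congr_left this, List.map_id]
    rw [PySem.Dict.items_foldl_insert_fresh _ (fun (e : Int × String) => e.1)
          (fun e => e.2) PySem.Dict.empty
          (by intro a _; exact PySem.Dict.contains_empty _) (by rw [hkeys]; exact hFnd)]
    simp only [show (PySem.Dict.empty : PySem.Dict Int String).items = [] from rfl, List.nil_append]
    rw [List.map_map]
    apply List.map_congr_left
    intro d _
    simp only [Function.comp, hfdef]
    split <;> rfl
  rw [hA, hB]
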